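-- pv_equiv track=rewrite | github.com/Muzzh/Codefights | TheCore/SortingOutpost/DigitDifferenceSort.py | digitDifferenceSort
-- ===== SOURCE A (Python) =====
-- def digitDifferenceSort(a):
--     b = []
--     a = a[::-1]
--     for i in range(len(a)):
--         x = a[i]
--         digits = [int(v) for v in str(a[i])]
--         y = max(digits) - min(digits)
--         b.append([x, y])
--     b = sorted(b, key = lambda x: int(x[1]))
--     return [b[x][0] for x in range(len(b))]
-- ===== SOURCE B (Python) =====
-- def digitDifferenceSort(a):
--     buckets = [[] for _ in range(10)]
--     for x in a[::-1]:
--         digits = [int(v) for v in str(x)]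
--         buckets[max(digits) - min(digits)].append(x)
--     return [v for bucket in buckets for v in bucket]
-- ===== Notes on version B (the rewrite author's own statement) =====
-- stated objective: alternative
-- what changed: Replaces the build-pairs-then-comparison-sort pipeline with a counting/bucket sort: each number is appended to one of 10 buckets indexed by its digit max-min spread while scanning the reversed input once, and the buckets are concatenated, preserving the stable-sort tie order; digit extraction dominates the runtime, so no measurable speedup.
import Mathlib
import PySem

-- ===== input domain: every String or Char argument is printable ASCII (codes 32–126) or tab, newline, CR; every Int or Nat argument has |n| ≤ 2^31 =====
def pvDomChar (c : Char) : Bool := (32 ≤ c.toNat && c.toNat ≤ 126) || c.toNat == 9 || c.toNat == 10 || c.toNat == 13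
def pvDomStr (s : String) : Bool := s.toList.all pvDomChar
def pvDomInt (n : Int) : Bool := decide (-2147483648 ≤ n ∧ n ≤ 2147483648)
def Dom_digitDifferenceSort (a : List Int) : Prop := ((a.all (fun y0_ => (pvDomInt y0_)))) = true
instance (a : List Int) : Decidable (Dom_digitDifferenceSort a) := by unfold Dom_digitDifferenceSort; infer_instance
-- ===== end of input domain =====

-- B replaces the pair-list + comparison sort with a 10-bucket counting sort over the digit spread (same stable order); proved equal on nonnegative inputs.

-- digit spread of x: max(int(v) for v in str(x)) - min(int(v) for v in str(x)), the expression both Pythons compute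
def pvSpread (x : Int) : Int :=
  ((PySem.List.max? ((PySem.Int.toChars x).map (fun c => (PySem.Int.ofChars? [c]).getD 0)) (fun d => d)).getD 0)
    - ((PySem.List.min? ((PySem.Int.toChars x).map (fun c => (PySem.Int.ofChars? [c]).getD 0)) (fun d => d)).getD 0)

-- ===== PORT A =====
def digitDifferenceSort (a : List Int) : List Int :=
  let ar := (PySem.List.slice? a none none (-1)).getD []        -- a = a[::-1]
  let b := (PySem.List.pyRange 0 (PySem.List.len ar) 1).foldl   -- for i in range(len(a)): b.append([a[i], y])
      (fun acc i => acc ++ [(PySem.List.pyGetD ar i 0, pvSpread (PySem.List.pyGetD ar i 0))]) []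
  let bs := PySem.List.sorted b (fun p => p.2)                  -- sorted(b, key=lambda x: int(x[1])); int() of an int is the int itself
  (PySem.List.pyRange 0 (PySem.List.len bs) 1).map (fun i => (PySem.List.pyGetD bs i (0, 0)).1)

-- ===== PORT B =====
def digitDifferenceSort_alt (a : List Int) : List Int :=
  let buckets := ((PySem.List.slice? a none none (-1)).getD []).foldl   -- for x in a[::-1]: buckets[spread].append(x)
      (fun bk x => PySem.List.pySetD bk (pvSpread x) (PySem.List.pyGetD bk (pvSpread x) [] ++ [x]))
      (List.replicate 10 [])
  buckets.foldl (fun acc bucket => acc ++ bucket) []            -- [v for bucket in buckets for v in bucket]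

-- ===== PRECONDITION & SPEC =====
-- Pre_ excludes lists containing a negative number: there str(x) starts with '-' and int('-') raises ValueError in both programs.
def Pre_digitDifferenceSort (a : List Int) : Prop := ∀ x ∈ a, 0 ≤ x
instance (a : List Int) : Decidable (Pre_digitDifferenceSort a) := by unfold Pre_digitDifferenceSort; infer_instance
def pvWitness_digitDifferenceSort : List Int := [13, 20, 7, 15]

def Spec_digitDifferenceSort (a : List Int) (out : List Int) : Prop := out = digitDifferenceSort_alt a
instance (a : List Int) (out : List Int) : Decidable (Spec_digitDifferenceSort a out) := by unfold Spec_digitDifferenceSort; infer_instance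

-- ===== CLAIM (what is proved, stated in full; the proofs are below) =====
def Claim_equal_digitDifferenceSort : Prop := ∀ (a : List Int), Dom_digitDifferenceSort a → Pre_digitDifferenceSort a → Spec_digitDifferenceSort a (digitDifferenceSort a)

-- ===== LEMMAS AND PROOFS =====

-- int(v) of a single decimal digit character lies in [0, 9]
theorem pvDigitVal_bounds (c : Char) (h : c.isDigit = true) :
    0 ≤ ((PySem.Int.ofChars? [c]).getD 0) ∧ ((PySem.Int.ofChars? [c]).getD 0) ≤ 9 := by
  simp [Char.isDigit] at h
  obtain ⟨h1, h2⟩ := h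
  have hc : Char.ofNat c.toNat = c := Char.ofNat_toNat c
  have h1' : 48 ≤ c.toNat := h1
  have h2' : c.toNat ≤ 57 := h2
  rw [← hc]
  interval_cases c.toNat <;> decide

-- for a nonnegative number the digit spread lies in [0, 9]
theorem pvSpread_bounds (x : Int) (hx : 0 ≤ x) : 0 ≤ pvSpread x ∧ pvSpread x ≤ 9 := by
  unfold pvSpread
  have htc : PySem.Int.toChars x = Nat.toDigits 10 x.toNat := by
    unfold PySem.Int.toChars
    rw [if_neg (by omega)]
  set digits := (PySem.Int.toChars x).map (fun c => (PySem.Int.ofChars? [c]).getD 0) with hdig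
  have hne : digits ≠ [] := by
    rw [hdig, htc, Ne, List.map_eq_nil_iff]
    exact List.ne_nil_of_length_pos Nat.length_toDigits_pos
  have hmem : ∀ d ∈ digits, 0 ≤ d ∧ d ≤ 9 := by
    intro d hd
    rw [hdig, htc] at hd
    obtain ⟨c, hc, rfl⟩ := List.mem_map.mp hd
    exact pvDigitVal_bounds c (Nat.isDigit_of_mem_toDigits (by omega) (by omega) hc)
  obtain ⟨M, hM⟩ := Option.ne_none_iff_exists'.mp
    (fun hn => hne ((PySem.List.max?_eq_none_iff digits (fun d => d)).mp hn))
  obtain ⟨m, hm⟩ := Option.ne_none_iff_exists'.mp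
    (fun hn => hne ((PySem.List.min?_eq_none_iff digits (fun d => d)).mp hn))
  have hMmem := PySem.List.max?_mem hM
  have hmmem := PySem.List.min?_mem hm
  have hmM : m ≤ M := PySem.List.min?_isMin hm M hMmem
  have hMb := hmem M hMmem
  have hmb := hmem m hmmem
  rw [hM, hm]
  simp only [Option.getD_some]
  omega

-- insertBy skips a prefix none of whose elements come after x
theorem pvInsertBy_append (before : Int → Int → Bool) (x : Int) (L1 L2 : List Int)
    (h : ∀ y ∈ L1, before x y = false) :
    PySem.List.insertBy before x (L1 ++ L2) = L1 ++ PySem.List.insertBy before x L2 := by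
  induction L1 with
  | nil => rfl
  | cons y ys ih =>
    simp only [List.cons_append, PySem.List.insertBy]
    rw [h y (by simp)]
    simp only [Bool.false_eq_true, if_false]
    rw [ih (fun z hz => h z (by simp [hz]))]

-- insertBy puts x in front when every element comes after it
theorem pvInsertBy_front (before : Int → Int → Bool) (x : Int) (ys : List Int)
    (h : ∀ y ∈ ys, before x y = true) :
    PySem.List.insertBy before x ys = x :: ys := by
  cases ys with
  | nil => rfl
  | cons y t =>
    simp only [PySem.List.insertBy]
    rw [h y (by simp)]
    simp

-- stable insertion commutes with tagging each element with its key
theorem pvInsertBy_map (key : Int → Int) (x : Int) (ys : List Int) :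
    PySem.List.insertBy (fun (p q : Int × Int) => decide (p.2 < q.2)) (x, key x)
        (ys.map (fun z => (z, key z)))
      = (PySem.List.insertBy (fun p q => decide (key p < key q)) x ys).map (fun z => (z, key z)) := by
  induction ys with
  | nil => rfl
  | cons y t ih =>
    simp only [List.map_cons, PySem.List.insertBy]
    by_cases h : key x < key y
    · simp [h]
    · simp only [h, decide_false, Bool.false_eq_true, if_false, List.map_cons]
      rw [← ih]

-- one bucket-sort step equals one stable insertion into the flattened buckets
theorem pvBucket_step (x : Int) (bk : List (List Int)) (k : Nat) (hlen : bk.length = 10)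
    (hpure : ∀ (j : Nat) (hj : j < bk.length), ∀ y ∈ bk[j], pvSpread y = (j : Int))
    (hk9 : k ≤ 9) (hkey : pvSpread x = (k : Int)) :
    PySem.List.insertBy (fun p q => decide (pvSpread p < pvSpread q)) x bk.flatten
      = (bk.set k (bk[k]'(by omega) ++ [x])).flatten := by
  have hklt : k < bk.length := by omega
  have hpre : ∀ y ∈ (bk.take (k+1)).flatten, (decide (pvSpread x < pvSpread y)) = false := by
    intro y hy
    obtain ⟨l', hl', hyl⟩ := List.mem_flatten.mp hy
    obtain ⟨j, hj, hjl⟩ := List.mem_iff_getElem.mp hl'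
    have hjlt : j < k + 1 := by simp at hj; omega
    rw [List.getElem_take] at hjl
    have hys : pvSpread y = (j : Int) := hpure j (by omega) y (by rw [hjl]; exact hyl)
    simp only [decide_eq_false_iff_not, not_lt]
    omega
  have hpost : ∀ y ∈ (bk.drop (k+1)).flatten, (decide (pvSpread x < pvSpread y)) = true := by
    intro y hy
    obtain ⟨l', hl', hyl⟩ := List.mem_flatten.mp hy
    obtain ⟨j, hj, hjl⟩ := List.mem_iff_getElem.mp hl'
    rw [List.getElem_drop] at hjl
    have hjb : k + 1 + j < bk.length := by simp at hj; omega
    have hys : pvSpread y = ((k+1+j : Nat) : Int) := hpure (k+1+j) hjb y (by rw [hjl]; exact hyl)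
    simp only [decide_eq_true_eq]
    push_cast at hys
    omega
  conv_lhs => rw [show bk = bk.take (k+1) ++ bk.drop (k+1) from (List.take_append_drop _ _).symm]
  rw [List.flatten_append, pvInsertBy_append _ _ _ _ hpre, pvInsertBy_front _ _ _ hpost]
  rw [List.set_eq_take_append_cons_drop, if_pos hklt, List.flatten_append]
  have htk : bk.take (k+1) = bk.take k ++ [bk[k]] := by
    rw [List.take_add_one]
    congr 1
    rw [List.getElem?_eq_getElem hklt]
    rfl
  rw [htk, List.flatten_append]
  simp only [List.flatten_cons, List.flatten_nil, List.append_nil, List.append_assoc, List.singleton_append]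

-- main induction: the stable-insertion fold over flattened buckets equals the bucket fold
theorem pvBucket_main (l : List Int) : ∀ (bk : List (List Int)), (∀ x ∈ l, 0 ≤ x) →
    bk.length = 10 →
    (∀ (j : Nat) (hj : j < bk.length), ∀ y ∈ bk[j], pvSpread y = (j : Int)) →
    l.foldl (fun acc x => PySem.List.insertBy (fun p q => decide (pvSpread p < pvSpread q)) x acc) bk.flatten
      = (l.foldl (fun bk x => PySem.List.pySetD bk (pvSpread x)
          (PySem.List.pyGetD bk (pvSpread x) [] ++ [x])) bk).flatten := by
  induction l with
  | nil => intro bk _ _ _; rfl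
  | cons x t ih =>
    intro bk hpos hlen hpure
    have hx := pvSpread_bounds x (hpos x (by simp))
    have hset : PySem.List.pySetD bk (pvSpread x) (PySem.List.pyGetD bk (pvSpread x) [] ++ [x])
        = bk.set (pvSpread x).toNat (bk[(pvSpread x).toNat]'(by omega) ++ [x]) := by
      rw [PySem.List.pySetD_of_nonneg _ _ hx.1,
          PySem.List.pyGetD_eq_getElem _ _ hx.1 (by rw [hlen]; omega)]
    simp only [List.foldl_cons, hset]
    rw [pvBucket_step x bk (pvSpread x).toNat hlen hpure (by omega)
      (by rw [Int.toNat_of_nonneg hx.1])]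
    apply ih _ (fun z hz => hpos z (by simp [hz]))
    · simp [hlen]
    · intro j hj y hy
      have hjb : j < bk.length := by simpa using hj
      rw [List.getElem_set] at hy
      by_cases hjk : (pvSpread x).toNat = j
      · subst hjk
        rw [if_pos rfl] at hy
        rcases List.mem_append.mp hy with hy | hy
        · exact hpure (pvSpread x).toNat hjb y hy
        · simp at hy; subst hy; omega
      · rw [if_neg hjk] at hy
        exact hpure j hjb y hy

-- sorting tagged pairs by the tag equals sorting the originals by the key, tagged afterwards
theorem pvSorted_map (l : List Int) (key : Int → Int) :
    PySem.List.sorted (l.map (fun z => (z, key z))) (fun p => p.2)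
      = (PySem.List.sorted l key).map (fun z => (z, key z)) := by
  rw [PySem.List.sorted_eq_foldl_insertBy, PySem.List.sorted_eq_foldl_insertBy]
  have : ∀ (ys : List Int),
      (l.map (fun z => (z, key z))).foldl
          (fun acc p => PySem.List.insertBy (fun (a b : Int × Int) => decide (a.2 < b.2)) p acc)
          (ys.map (fun z => (z, key z)))
        = (l.foldl (fun acc x => PySem.List.insertBy (fun a b => decide (key a < key b)) x acc) ys).map
            (fun z => (z, key z)) := by
    induction l with
    | nil => intro ys; rfl
    | cons x t ih =>
      intro ys
      simp only [List.map_cons, List.foldl_cons]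
      rw [← ih (PySem.List.insertBy (fun a b => decide (key a < key b)) x ys)]
      congr 1
      exact pvInsertBy_map key x ys

  simpa using this []

-- ===== VERDICT (by name: the statement is the Claim_ definition above) =====
theorem digitDifferenceSort_spec : Claim_equal_digitDifferenceSort := by
  intro a _ hpre
  unfold Spec_digitDifferenceSort digitDifferenceSort digitDifferenceSort_alt
  simp only [PySem.List.slice?_none_none_neg_one, Option.getD_some]
  -- A side: collapse the index loops
  rw [PySem.List.foldl_pyRange_zero_pyGetD a.reverse 0
      (fun acc x => acc ++ [(x, pvSpread x)]) []]
  rw [PySem.List.foldl_append_singleton_eq_map (fun x => (x, pvSpread x)) a.reverse []]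
  simp only [List.nil_append]
  rw [pvSorted_map a.reverse pvSpread]
  rw [show (fun (i : Int) => (PySem.List.pyGetD ((PySem.List.sorted a.reverse pvSpread).map (fun z => (z, pvSpread z))) i ((0 : Int), (0 : Int))).1)
      = ((fun (p : Int × Int) => p.1) ∘ (fun (i : Int) => PySem.List.pyGetD ((PySem.List.sorted a.reverse pvSpread).map (fun z => (z, pvSpread z))) i ((0 : Int), (0 : Int)))) from rfl]
  rw [← List.map_map, PySem.List.map_pyGetD_pyRange_zero, List.map_map]
  -- B side: collapse the concatenation loop
  rw [PySem.List.foldl_append_eq_flatten]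
  simp only [List.nil_append]
  have hpos : ∀ x ∈ a.reverse, 0 ≤ x := fun x hx => hpre x (List.mem_reverse.mp hx)
  rw [← pvBucket_main a.reverse (List.replicate 10 []) hpos (by simp)
      (by intro j hj y hy; rw [List.getElem_replicate] at hy; simp at hy)]
  rw [show (List.replicate 10 ([] : List Int)).flatten = [] by simp]
  rw [PySem.List.sorted_eq_foldl_insertBy]
  rw [show ((fun (p : Int × Int) => p.1) ∘ fun z => (z, pvSpread z)) = id from rfl, List.map_id]
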